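-- pv_equiv track=rewrite | github.com/smmariquit/pjdsc-economic-impact | data/raw/Impact_data/combine_impact_datasets.py | _normalize_house_row
-- ===== SOURCE A (Python) =====
-- from typing import List, Dict, Optional, Tuple
--
-- def _normalize_house_row(r: Dict[str, str]) -> Dict[str, str]:
--     # Map possible case variants to standard output header
--     def find_key(options: List[str]) -> Optional[str]:
--         for k in r.keys():
--             kl = k.lower()
--             for opt in options:
--                 if kl == opt:
--                     return k
--         return None
--
--     k_destroyed = find_key(["houses destroyed", "destroyed", "houses_destroyed"]) or "Houses destroyed"
--     k_damaged = find_key(["houses damaged", "damaged", "houses_damaged"]) or "Houses damaged"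
--     k_total = find_key(["total houses", "total", "total_houses"]) or "Total Houses"
--
--     out = {
--         "Year": str(r.get("Year", "")).strip(),
--         "Storm": str(r.get("Storm", "")).strip(),
--         "Province": str(r.get("Province", "")).strip(),
--         "Houses destroyed": str(r.get(k_destroyed, r.get("Houses destroyed", ""))).strip(),
--         "Houses damaged": str(r.get(k_damaged, r.get("Houses damaged", ""))).strip(),
--         "Total Houses": str(r.get(k_total, r.get("Total Houses", ""))).strip(),
--     }
--     return out
-- ===== SOURCE B (Python) =====
-- def _normalize_house_row(r):
--     destroyed_opts = ("houses destroyed", "destroyed", "houses_destroyed")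
--     damaged_opts = ("houses damaged", "damaged", "houses_damaged")
--     total_opts = ("total houses", "total", "total_houses")
--     kd = kg = kt = None
--     for k in r.keys():
--         kl = k.lower()
--         if kd is None and kl in destroyed_opts:
--             kd = k
--         if kg is None and kl in damaged_opts:
--             kg = k
--         if kt is None and kl in total_opts:
--             kt = k
--     kd = kd or "Houses destroyed"
--     kg = kg or "Houses damaged"
--     kt = kt or "Total Houses"
--
--     def val(key, std):
--         return str(r.get(key, r.get(std, ""))).strip()
--
--     return {
--         "Year": str(r.get("Year", "")).strip(),
--         "Storm": str(r.get("Storm", "")).strip(),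
--         "Province": str(r.get("Province", "")).strip(),
--         "Houses destroyed": val(kd, "Houses destroyed"),
--         "Houses damaged": val(kg, "Houses damaged"),
--         "Total Houses": val(kt, "Total Houses"),
--     }
-- ===== Notes on version B (the rewrite author's own statement) =====
-- stated objective: alternative
-- what changed: A scans the row's keys three times (once per category via find_key with a nested options loop); B makes a single classifying pass over the keys that fills three slots (first matching key per category), then builds the same output.
import Mathlib
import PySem

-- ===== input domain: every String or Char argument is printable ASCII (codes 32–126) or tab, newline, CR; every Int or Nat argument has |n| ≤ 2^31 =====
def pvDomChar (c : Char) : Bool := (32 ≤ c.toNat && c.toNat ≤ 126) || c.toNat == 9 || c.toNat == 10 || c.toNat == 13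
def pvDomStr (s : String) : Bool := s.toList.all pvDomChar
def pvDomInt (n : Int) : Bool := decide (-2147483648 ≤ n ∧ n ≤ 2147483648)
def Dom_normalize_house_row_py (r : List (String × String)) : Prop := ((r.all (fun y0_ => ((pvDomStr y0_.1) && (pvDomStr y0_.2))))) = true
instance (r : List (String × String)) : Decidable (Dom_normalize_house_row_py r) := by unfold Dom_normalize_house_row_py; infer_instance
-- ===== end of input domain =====

-- B replaces A's three separate scans of the row's keys by one classifying pass
-- that fills three slots (objective: alternative decomposition, same cost).

-- ===== PORT A =====
-- r.get(k, dflt) on the association list (lookup = first match)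
def pyGetD (r : List (String × String)) (k dflt : String) : String :=
  match r.find? (fun p => p.1 == k) with
  | some p => p.2
  | none => dflt

-- A's find_key: outer loop over r.keys(), inner loop over options
def findKeyA (r : List (String × String)) (options : List String) : Option String :=
  match r with
  | [] => none
  | (k, _) :: rest =>
    if options.any (fun opt => PySem.Str.lower k == opt) then some k
    else findKeyA rest options

def normalize_house_row_py (r : List (String × String)) : List (String × String) :=
  let k_destroyed := (findKeyA r ["houses destroyed", "destroyed", "houses_destroyed"]).getD "Houses destroyed"
  let k_damaged := (findKeyA r ["houses damaged", "damaged", "houses_damaged"]).getD "Houses damaged"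
  let k_total := (findKeyA r ["total houses", "total", "total_houses"]).getD "Total Houses"
  [("Year", PySem.Str.strip (pyGetD r "Year" "")),
   ("Storm", PySem.Str.strip (pyGetD r "Storm" "")),
   ("Province", PySem.Str.strip (pyGetD r "Province" "")),
   ("Houses destroyed", PySem.Str.strip (pyGetD r k_destroyed (pyGetD r "Houses destroyed" ""))),
   ("Houses damaged", PySem.Str.strip (pyGetD r k_damaged (pyGetD r "Houses damaged" ""))),
   ("Total Houses", PySem.Str.strip (pyGetD r k_total (pyGetD r "Total Houses" "")))]

-- ===== PORT B =====
-- one loop iteration of B: fill each still-empty slot whose option set contains kl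
def scanStepB (s : Option String × Option String × Option String) (k : String) :
    Option String × Option String × Option String :=
  let kl := PySem.Str.lower k
  let kd := if s.1.isNone && ["houses destroyed", "destroyed", "houses_destroyed"].contains kl then some k else s.1
  let kg := if s.2.1.isNone && ["houses damaged", "damaged", "houses_damaged"].contains kl then some k else s.2.1
  let kt := if s.2.2.isNone && ["total houses", "total", "total_houses"].contains kl then some k else s.2.2
  (kd, kg, kt)

-- B's val helper
def valB (r : List (String × String)) (key std : String) : String :=
  PySem.Str.strip (pyGetD r key (pyGetD r std ""))

def normalize_house_row_py_alt (r : List (String × String)) : List (String × String) :=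
  let s := r.foldl (fun s p => scanStepB s p.1) (none, none, none)
  let kd := s.1.getD "Houses destroyed"
  let kg := s.2.1.getD "Houses damaged"
  let kt := s.2.2.getD "Total Houses"
  [("Year", PySem.Str.strip (pyGetD r "Year" "")),
   ("Storm", PySem.Str.strip (pyGetD r "Storm" "")),
   ("Province", PySem.Str.strip (pyGetD r "Province" "")),
   ("Houses destroyed", valB r kd "Houses destroyed"),
   ("Houses damaged", valB r kg "Houses damaged"),
   ("Total Houses", valB r kt "Total Houses")]

-- ===== PRECONDITION & SPEC =====
def Spec_normalize_house_row_py (r : List (String × String)) (out : List (String × String)) : Prop := out = normalize_house_row_py_alt r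
instance (r : List (String × String)) (out : List (String × String)) : Decidable (Spec_normalize_house_row_py r out) := by unfold Spec_normalize_house_row_py; infer_instance

-- ===== CLAIM (what is proved, stated in full; the proofs are below) =====
def Claim_equal_normalize_house_row_py : Prop := ∀ (r : List (String × String)), Dom_normalize_house_row_py r → Spec_normalize_house_row_py r (normalize_house_row_py r)

-- ===== LEMMAS AND PROOFS =====

-- one slot of B's step, composed with the remaining scan, equals A's scan of the whole list
theorem slot_eq (rest : List (String × String)) (k : String) (a : Option String)
    (opts : List String) :
    (Option.orElse (if a.isNone && opts.contains (PySem.Str.lower k) then some k else a)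
        fun _ => findKeyA rest opts) =
      Option.orElse a
        fun _ => if opts.any (fun o => PySem.Str.lower k == o) then some k
                 else findKeyA rest opts := by
  cases a <;> simp [Option.orElse] <;> split_ifs <;> simp_all

-- the single classifying pass computes the three separate first-match scans
theorem scanB_eq (r : List (String × String)) (a b c : Option String) :
    r.foldl (fun s p => scanStepB s p.1) (a, b, c) =
      ((Option.orElse a fun _ => findKeyA r ["houses destroyed", "destroyed", "houses_destroyed"]),
       (Option.orElse b fun _ => findKeyA r ["houses damaged", "damaged", "houses_damaged"]),
       (Option.orElse c fun _ => findKeyA r ["total houses", "total", "total_houses"])) := by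
  induction r generalizing a b c with
  | nil => cases a <;> cases b <;> cases c <;> simp [findKeyA, Option.orElse]
  | cons p rest ih =>
    obtain ⟨k, v⟩ := p
    have hstep : scanStepB (a, b, c) k =
        (if a.isNone && ["houses destroyed", "destroyed", "houses_destroyed"].contains (PySem.Str.lower k) then some k else a,
         if b.isNone && ["houses damaged", "damaged", "houses_damaged"].contains (PySem.Str.lower k) then some k else b,
         if c.isNone && ["total houses", "total", "total_houses"].contains (PySem.Str.lower k) then some k else c) := rfl
    rw [List.foldl_cons, hstep, ih]
    simp only [findKeyA]
    exact Prod.ext (slot_eq ..) (Prod.ext (slot_eq ..) (slot_eq ..))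

-- ===== VERDICT (by name: the statement is the Claim_ definition above) =====
theorem normalize_house_row_py_spec : Claim_equal_normalize_house_row_py := by
  intro r _
  unfold Spec_normalize_house_row_py normalize_house_row_py normalize_house_row_py_alt valB
  rw [scanB_eq]
  cases h1 : findKeyA r ["houses destroyed", "destroyed", "houses_destroyed"] <;>
  cases h2 : findKeyA r ["houses damaged", "damaged", "houses_damaged"] <;>
  cases h3 : findKeyA r ["total houses", "total", "total_houses"] <;>
  simp [Option.orElse]
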